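-- pv_equiv track=rewrite | github.com/nixternal/CodingChallenges | AdventOfCode/2024/12.py | calculate_perimeter
-- ===== SOURCE A (Python) =====
-- def calculate_perimeter(region) -> int:
--     """
--     Calculates the perimeter of a region based on its boundary cells.
--
--     Args:
--         region (set): A set of tuples representing the coordinates of the
--                       cells in the region.
--
--     Returns:
--         int: The total perimeter of the region.
--     """
--
--     perimeter = 0
--     # Relative positions of neighbors
--     neighbors = [(1, 0), (-1, 0), (0, 1), (0, -1)]
--
--     for r, c in region:
--         for dr, dc in neighbors:
--             # If a neighboring cell is outside the region, it contributes to
--             # the perimeter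
--             if (r + dr, c + dc) not in region:
--                 # Count edges that are not shared w/ another cell in the region
--                 perimeter += 1
--     return perimeter
-- ===== SOURCE B (Python) =====
-- def calculate_perimeter(region) -> int:
--     """Perimeter = 4*|region| minus twice the number of internally shared edges.
--
--     Each adjacent pair of cells is found exactly once by looking only at the
--     right and down neighbors of every cell.
--     """
--     adjacencies = 0
--     for r, c in region:
--         if (r + 1, c) in region:
--             adjacencies += 1
--         if (r, c + 1) in region:
--             adjacencies += 1
--     return 4 * len(region) - 2 * adjacencies
-- ===== Notes on version B (the rewrite author's own statement) =====
-- stated objective: alternative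
-- what changed: Instead of summing, per cell, the four neighbor directions that leave the region, B counts each internally shared edge once by probing only the right and down neighbors and closes with the formula 4*len(region) - 2*adjacencies.
import Mathlib
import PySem

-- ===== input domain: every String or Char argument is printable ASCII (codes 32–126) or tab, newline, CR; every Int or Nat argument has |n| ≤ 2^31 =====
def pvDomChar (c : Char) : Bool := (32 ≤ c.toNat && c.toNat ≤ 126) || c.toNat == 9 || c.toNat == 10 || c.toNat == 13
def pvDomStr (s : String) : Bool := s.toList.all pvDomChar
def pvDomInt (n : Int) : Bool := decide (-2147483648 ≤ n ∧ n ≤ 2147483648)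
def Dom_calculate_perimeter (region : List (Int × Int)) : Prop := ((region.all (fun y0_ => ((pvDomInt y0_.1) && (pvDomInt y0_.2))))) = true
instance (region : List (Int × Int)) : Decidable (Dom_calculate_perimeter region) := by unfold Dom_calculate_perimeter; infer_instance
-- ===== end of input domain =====

-- B counts each shared internal edge once (right/down probes only) and closes with
-- 4*len - 2*adjacencies, instead of A's per-cell scan of all four exposed directions.

-- ===== PORT A =====
def calculate_perimeter (region : List (Int × Int)) : Int :=
  let neighbors : List (Int × Int) := [(1, 0), (-1, 0), (0, 1), (0, -1)]
  region.foldl (fun perimeter rc =>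
    neighbors.foldl (fun p d =>
      if (rc.1 + d.1, rc.2 + d.2) ∉ region then p + 1 else p) perimeter) 0

-- ===== PORT B =====
def calculate_perimeter_alt (region : List (Int × Int)) : Int :=
  let adjacencies : Int := region.foldl (fun a rc =>
    let a := if (rc.1 + 1, rc.2) ∈ region then a + 1 else a
    if (rc.1, rc.2 + 1) ∈ region then a + 1 else a) 0
  4 * region.length - 2 * adjacencies

-- ===== PRECONDITION & SPEC =====
-- Python's `region` is a set, which the list encoding represents with distinct elements;
-- Pre_ excludes lists with duplicate pairs, unrepresentable as a Python set, where the
-- two list readings legitimately disagree (edge-sharing symmetry fails under multiplicity).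
def Pre_calculate_perimeter (region : List (Int × Int)) : Prop := region.Nodup
instance (region : List (Int × Int)) : Decidable (Pre_calculate_perimeter region) := by unfold Pre_calculate_perimeter; infer_instance
def pvWitness_calculate_perimeter : (List (Int × Int)) := [(0, 0), (0, 1), (1, 1)]

def Spec_calculate_perimeter (region : List (Int × Int)) (out : Int) : Prop := out = calculate_perimeter_alt region
instance (region : List (Int × Int)) (out : Int) : Decidable (Spec_calculate_perimeter region out) := by unfold Spec_calculate_perimeter; infer_instance

-- ===== CLAIM (what is proved, stated in full; the proofs are below) =====
def Claim_equal_calculate_perimeter : Prop := ∀ (region : List (Int × Int)), Dom_calculate_perimeter region → Pre_calculate_perimeter region → Spec_calculate_perimeter region (calculate_perimeter region)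

-- ===== LEMMAS AND PROOFS =====

-- number of cells of L whose d-translate is again in L
def pvShift (d : Int × Int) (L : List (Int × Int)) : Int :=
  ((L.filter (fun x => decide ((x.1 + d.1, x.2 + d.2) ∈ L))).length : Int)

theorem pv_inner (L : List (Int × Int)) (rc : Int × Int) (a : Int) :
    [((1 : Int), (0 : Int)), (-1, 0), (0, 1), (0, -1)].foldl (fun p d =>
        if (rc.1 + d.1, rc.2 + d.2) ∉ L then p + 1 else p) a
      = a + 4
        - ((if (rc.1 + 1, rc.2 + 0) ∈ L then 1 else 0)
          + (if (rc.1 + -1, rc.2 + 0) ∈ L then 1 else 0)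
          + (if (rc.1 + 0, rc.2 + 1) ∈ L then 1 else 0)
          + (if (rc.1 + 0, rc.2 + -1) ∈ L then 1 else 0)) := by
  simp only [List.foldl_cons, List.foldl_nil]
  split_ifs <;> ring

theorem pvA_sum (L : List (Int × Int)) :
    calculate_perimeter L
      = 4 * L.length - (pvShift (1, 0) L + pvShift (-1, 0) L + pvShift (0, 1) L + pvShift (0, -1) L) := by
  unfold calculate_perimeter pvShift
  have step : ∀ (M : List (Int × Int)) (a : Int),
      M.foldl (fun perimeter rc =>
        [((1 : Int), (0 : Int)), (-1, 0), (0, 1), (0, -1)].foldl (fun p d =>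
          if (rc.1 + d.1, rc.2 + d.2) ∉ L then p + 1 else p) perimeter) a
      = a + 4 * M.length
          - (((M.filter (fun x => decide ((x.1 + 1, x.2 + 0) ∈ L))).length : Int)
            + ((M.filter (fun x => decide ((x.1 + -1, x.2 + 0) ∈ L))).length : Int)
            + ((M.filter (fun x => decide ((x.1 + 0, x.2 + 1) ∈ L))).length : Int)
            + ((M.filter (fun x => decide ((x.1 + 0, x.2 + -1) ∈ L))).length : Int)) := by
    intro M
    induction M with
    | nil => simp
    | cons x xs ih =>
        intro a
        rw [List.foldl_cons, pv_inner, ih,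
          List.filter_cons, List.filter_cons, List.filter_cons, List.filter_cons]
        simp only [decide_eq_true_eq]
        split_ifs <;> simp only [List.length_cons] <;> push_cast <;> ring
  have := step L 0
  simp only [this]
  ring

theorem pvB_sum (L : List (Int × Int)) :
    calculate_perimeter_alt L
      = 4 * L.length - 2 * (pvShift (1, 0) L + pvShift (0, 1) L) := by
  unfold calculate_perimeter_alt pvShift
  have hpair : ∀ (rc : Int × Int), ((rc.1 + 1, rc.2) ∈ L) = ((rc.1 + 1, rc.2 + 0) ∈ L) ∧
      ((rc.1, rc.2 + 1) ∈ L) = ((rc.1 + 0, rc.2 + 1) ∈ L) := by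
    intro rc; cases rc; simp
  have step : ∀ (M : List (Int × Int)) (a : Int),
      M.foldl (fun a rc =>
        let a := if (rc.1 + 1, rc.2) ∈ L then a + 1 else a
        if (rc.1, rc.2 + 1) ∈ L then a + 1 else a) a
      = a + (((M.filter (fun x => decide ((x.1 + 1, x.2 + 0) ∈ L))).length : Int)
            + ((M.filter (fun x => decide ((x.1 + 0, x.2 + 1) ∈ L))).length : Int)) := by
    intro M
    induction M with
    | nil => simp
    | cons x xs ih =>
        intro a
        rw [List.foldl_cons]
        show (xs.foldl _ (if (x.1, x.2 + 1) ∈ L then (if (x.1 + 1, x.2) ∈ L then a + 1 else a) + 1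
          else (if (x.1 + 1, x.2) ∈ L then a + 1 else a))) = _
        rw [ih, List.filter_cons, List.filter_cons]
        simp only [decide_eq_true_eq, (hpair x).1, (hpair x).2]
        split_ifs <;> simp only [List.length_cons] <;> push_cast <;> ring
  have := step L 0
  simp only [this]
  ring

-- the translation x ↦ x + d is a bijection between {x ∈ L | x + d ∈ L} and {x ∈ L | x - d ∈ L}
theorem pvShift_symm (d : Int × Int) (L : List (Int × Int)) (h : L.Nodup) :
    pvShift d L = pvShift (-d.1, -d.2) L := by
  unfold pvShift
  congr 1
  have hlen : ∀ (p : Int × Int → Bool),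
      (L.filter p).length = (L.toFinset.filter (fun x => p x = true)).card := by
    intro p
    rw [← List.toFinset_filter, List.toFinset_card_of_nodup (h.filter p)]
  rw [hlen, hlen]
  refine Finset.card_nbij' (fun x => (x.1 + d.1, x.2 + d.2)) (fun y => (y.1 + -d.1, y.2 + -d.2))
    ?_ ?_ ?_ ?_
  · intro x hx
    simp only [Finset.coe_filter, Set.mem_setOf_eq, List.mem_toFinset, decide_eq_true_eq] at hx ⊢
    refine ⟨hx.2, ?_⟩
    have hxx : (x.1 + d.1 + -d.1, x.2 + d.2 + -d.2) = x := by
      cases x; simp only [Prod.mk.injEq]; constructor <;> ring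
    rw [hxx]; exact hx.1
  · intro y hy
    simp only [Finset.coe_filter, Set.mem_setOf_eq, List.mem_toFinset, decide_eq_true_eq] at hy ⊢
    refine ⟨hy.2, ?_⟩
    have hyy : (y.1 + -d.1 + d.1, y.2 + -d.2 + d.2) = y := by
      cases y; simp only [Prod.mk.injEq]; constructor <;> ring
    rw [hyy]; exact hy.1
  · intro x _
    cases x; simp only [Prod.mk.injEq]; constructor <;> ring
  · intro y _
    cases y; simp only [Prod.mk.injEq]; constructor <;> ring

-- ===== VERDICT (by name: the statement is the Claim_ definition above) =====
theorem calculate_perimeter_spec : Claim_equal_calculate_perimeter := by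
  intro region _ hpre
  unfold Spec_calculate_perimeter
  rw [pvA_sum, pvB_sum]
  have h1 := pvShift_symm (1, 0) region hpre
  have h2 := pvShift_symm (0, 1) region hpre
  norm_num at h1 h2
  rw [← h1, ← h2]
  ring
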